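-- pv_equiv track=rewrite | github.com/enlihhhhh/ntu-scse-dashboard | app/app.py | pubs_count_rank
-- ===== SOURCE A (Python) =====
-- def pubs_count_rank(publications):
--     rank_counts = {}
--     ranking_order = ['A*', 'A', 'B', 'C', 'D', 'E']
--
--     for publication in publications:
--         rank = publication['venue_rank']
--
--         if rank in ranking_order:
--             if rank in rank_counts:
--                 rank_counts[rank] += 1
--             else:
--                 rank_counts[rank] = 1
--
--     return rank_counts
-- ===== SOURCE B (Python) =====
-- def pubs_count_rank(publications):
--     ranking_order = ['A*', 'A', 'B', 'C', 'D', 'E']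
--     ranks = [publication['venue_rank'] for publication in publications]
--     valid = [r for r in ranks if r in ranking_order]
--     seen = []
--     for r in valid:
--         if r not in seen:
--             seen.append(r)
--     return {r: valid.count(r) for r in seen}
-- ===== Notes on version B (the rewrite author's own statement) =====
-- stated objective: alternative
-- what changed: Instead of one pass that accumulates a counter dict, B first extracts the valid ranks, dedups them in first-occurrence order, and builds the dict by counting each distinct rank with list.count.
import Mathlib
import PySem

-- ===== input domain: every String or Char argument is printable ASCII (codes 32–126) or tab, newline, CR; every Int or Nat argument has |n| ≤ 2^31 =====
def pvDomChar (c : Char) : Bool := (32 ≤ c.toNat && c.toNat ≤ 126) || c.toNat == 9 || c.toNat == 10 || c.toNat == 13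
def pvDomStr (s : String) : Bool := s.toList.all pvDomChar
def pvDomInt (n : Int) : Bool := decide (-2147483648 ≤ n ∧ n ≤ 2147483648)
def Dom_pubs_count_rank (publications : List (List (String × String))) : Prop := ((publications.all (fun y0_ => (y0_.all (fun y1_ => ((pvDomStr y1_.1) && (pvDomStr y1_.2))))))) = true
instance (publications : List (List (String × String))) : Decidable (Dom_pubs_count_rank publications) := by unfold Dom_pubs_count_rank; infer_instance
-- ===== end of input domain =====

-- B builds the same counter dict by a different decomposition: extract ranks, dedup in
-- first-occurrence order, then count each distinct rank; same return value as A's single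
-- accumulating pass.

-- ===== PORT A =====
-- publication['venue_rank']: Pre_ guarantees the key is present, so getD "" never fires its default
def pubs_count_rank (publications : List (List (String × String))) : List (String × Int) :=
  let ranking_order := ["A*", "A", "B", "C", "D", "E"]
  (publications.foldl (fun rank_counts publication =>
    let rank := ((PySem.Dict.ofList publication).get? "venue_rank").getD ""
    if rank ∈ ranking_order then
      if rank_counts.contains rank then
        rank_counts.insert rank (rank_counts.getD rank 0 + 1)
      else
        rank_counts.insert rank 1
    else rank_counts) (PySem.Dict.empty : PySem.Dict String Int)).items

-- ===== PORT B =====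
def pubs_count_rank_alt (publications : List (List (String × String))) : List (String × Int) :=
  let ranking_order := ["A*", "A", "B", "C", "D", "E"]
  let ranks := publications.map (fun publication =>
    ((PySem.Dict.ofList publication).get? "venue_rank").getD "")
  let valid := ranks.filter (fun r => decide (r ∈ ranking_order))
  let seen := valid.foldl (fun seen r => if PySem.Set.contains seen r then seen else seen ++ [r]) []
  seen.map (fun r => (r, (valid.count r : Int)))

-- ===== PRECONDITION & SPEC =====
-- Pre_ excludes exactly the inputs where some publication lacks the 'venue_rank' key, on which A raises KeyError.
def Pre_pubs_count_rank (publications : List (List (String × String))) : Prop :=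
  ∀ p ∈ publications, (PySem.Dict.ofList p).contains "venue_rank" = true
instance (publications : List (List (String × String))) : Decidable (Pre_pubs_count_rank publications) := by unfold Pre_pubs_count_rank; infer_instance

def pvWitness_pubs_count_rank : (List (List (String × String))) :=
  [[("venue_rank", "A")], [("title", "x"), ("venue_rank", "B")]]

def Spec_pubs_count_rank (publications : List (List (String × String))) (out : List (String × Int)) : Prop := out = pubs_count_rank_alt publications
instance (publications : List (List (String × String))) (out : List (String × Int)) : Decidable (Spec_pubs_count_rank publications out) := by unfold Spec_pubs_count_rank; infer_instance

-- ===== CLAIM (what is proved, stated in full; the proofs are below) =====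
def Claim_equal_pubs_count_rank : Prop := ∀ (publications : List (List (String × String))), Dom_pubs_count_rank publications → Pre_pubs_count_rank publications → Spec_pubs_count_rank publications (pubs_count_rank publications)

-- ===== LEMMAS AND PROOFS =====

-- A's two-way branch is the single 'insert (getD + 1)' step, for every dict
lemma branch_eq (d : PySem.Dict String Int) (r : String) :
    (if d.contains r then d.insert r (d.getD r 0 + 1) else d.insert r 1) =
      d.insert r (d.getD r 0 + 1) := by
  by_cases h : d.contains r = true
  · simp [h]
  · simp [h, PySem.Dict.getD_of_not_contains d 0 (by simpa using h)]

theorem pubs_count_rank_eq_counter (publications : List (List (String × String))) :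
    pubs_count_rank publications = pubs_count_rank_alt publications := by
  set rankfn := fun publication : List (String × String) =>
    ((PySem.Dict.ofList publication).get? "venue_rank").getD "" with hrank
  set RO := ["A*", "A", "B", "C", "D", "E"] with hRO
  set valid := (publications.filter (fun p => decide (rankfn p ∈ RO))).map rankfn with hvalid
  set vlist := (publications.map rankfn).filter (fun r => decide (r ∈ RO)) with hvlist
  -- A's loop, with its two-way branch collapsed by branch_eq, is the counter loop over valid
  have hA : pubs_count_rank publications
      = (PySem.Set.ofList valid).map (fun k => (k, (valid.count k : Int))) := by
    unfold pubs_count_rank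
    show (publications.foldl (fun rank_counts publication =>
          let rank := ((PySem.Dict.ofList publication).get? "venue_rank").getD ""
          if rank ∈ ["A*", "A", "B", "C", "D", "E"] then
            if rank_counts.contains rank then
              rank_counts.insert rank (rank_counts.getD rank 0 + 1)
            else rank_counts.insert rank 1
          else rank_counts) (PySem.Dict.empty : PySem.Dict String Int)).items = _
    rw [show (publications.foldl (fun rank_counts publication =>
          let rank := ((PySem.Dict.ofList publication).get? "venue_rank").getD ""
          if rank ∈ ["A*", "A", "B", "C", "D", "E"] then
            if rank_counts.contains rank then
              rank_counts.insert rank (rank_counts.getD rank 0 + 1)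
            else rank_counts.insert rank 1
          else rank_counts) (PySem.Dict.empty : PySem.Dict String Int))
        = publications.foldl (fun d p =>
            if rankfn p ∈ RO then d.insert (rankfn p) (d.getD (rankfn p) 0 + 1) else d)
            PySem.Dict.empty from
      PySem.List.foldl_congr_mem _ _ _ _ (fun d p _ => by
        by_cases h : rankfn p ∈ RO <;> simp [branch_eq, hrank, hRO])]
    rw [PySem.List.foldl_ite_eq_foldl_filter (p := fun p => rankfn p ∈ RO)
        (f := fun (d : PySem.Dict String Int) p => d.insert (rankfn p) (d.getD (rankfn p) 0 + 1)),
        ← List.foldl_map (f := rankfn)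
        (g := fun (d : PySem.Dict String Int) r => d.insert r (d.getD r 0 + 1)),
        PySem.Dict.foldl_insert_getD_add_one_eq_counter, PySem.Dict.items_counter]
  -- B's seen-loop is Set.ofList
  have hB : pubs_count_rank_alt publications
      = (PySem.Set.ofList vlist).map (fun r => (r, (vlist.count r : Int))) := by
    unfold pubs_count_rank_alt
    show (vlist.foldl (fun seen r => if PySem.Set.contains seen r then seen else seen ++ [r])
        []).map (fun r => (r, (vlist.count r : Int))) = _
    rw [show (vlist.foldl (fun seen r =>
          if PySem.Set.contains seen r then seen else seen ++ [r]) [])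
        = PySem.Set.ofList vlist from by
      rw [PySem.Set.ofList_eq_foldl]
      exact PySem.List.foldl_congr_mem _ _ _ _ (fun s r _ => rfl)]
  have hmf : vlist = valid := by
    rw [hvlist, hvalid, List.filter_map]; rfl
  rw [hA, hB, hmf]

-- ===== VERDICT (by name: the statement is the Claim_ definition above) =====
theorem pubs_count_rank_spec : Claim_equal_pubs_count_rank := by
  intro publications _ _
  exact (pubs_count_rank_eq_counter publications).symm ▸ rfl
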